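-- pv_equiv track=rewrite | github.com/jvcss/loteria | valida.py | search_sequences
-- ===== SOURCE A (Python) =====
-- def search_sequences(sequences, search_numbers):
--     results = []
--     search_set = set(search_numbers)
--     for seq in sequences:
--         match_count = len(search_set.intersection(seq))
--         if match_count > 0:
--             results.append((seq, match_count))
--     results.sort(key=lambda x: x[1], reverse=True)
--     return results
-- ===== SOURCE B (Python) =====
-- def search_sequences(sequences, search_numbers):
--     # Counting sort by match count (buckets keyed by count) instead of a comparison sort.
--     search_set = set(search_numbers)
--     buckets = {}
--     for seq in sequences:
--         c = len(search_set.intersection(seq))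
--         if c > 0:
--             buckets[c] = buckets.get(c, []) + [(seq, c)]
--     results = []
--     for c in range(len(search_set), 0, -1):
--         results += buckets.get(c, [])
--     return results
-- ===== Notes on version B (the rewrite author's own statement) =====
-- stated objective: alternative
-- what changed: Replaces the comparison sort by match count with a counting sort: matches are appended to buckets keyed by their count during the single pass, and the result is assembled by walking the possible counts from the maximum possible (len(search_set)) down to 1, preserving the stable tie order.
import Mathlib
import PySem

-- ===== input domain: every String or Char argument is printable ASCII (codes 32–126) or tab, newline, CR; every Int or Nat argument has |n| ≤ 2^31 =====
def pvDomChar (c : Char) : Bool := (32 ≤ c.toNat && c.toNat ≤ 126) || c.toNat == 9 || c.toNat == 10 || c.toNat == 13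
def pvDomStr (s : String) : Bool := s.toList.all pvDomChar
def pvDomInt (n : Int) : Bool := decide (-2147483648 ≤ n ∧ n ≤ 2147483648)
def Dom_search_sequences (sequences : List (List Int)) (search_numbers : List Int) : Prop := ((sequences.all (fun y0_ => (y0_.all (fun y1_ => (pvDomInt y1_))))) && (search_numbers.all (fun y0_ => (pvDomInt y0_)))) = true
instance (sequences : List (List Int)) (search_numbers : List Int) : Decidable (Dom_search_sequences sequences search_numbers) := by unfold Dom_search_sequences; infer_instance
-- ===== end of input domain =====

-- B replaces A's comparison sort on (sequence, match-count) pairs by a counting sort over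
-- buckets keyed by the match count (alternative algorithm, same return value).

-- ===== PORT A =====
def search_sequences (sequences : List (List Int)) (search_numbers : List Int) : List (List Int × Int) :=
  let search_set := PySem.Set.ofList search_numbers
  let results := sequences.foldl (fun results seq =>
      let match_count := PySem.Set.len (PySem.Set.inter search_set seq)
      if match_count > 0 then results ++ [(seq, match_count)] else results) []
  PySem.List.sorted results (fun x => x.2) true

-- ===== PORT B =====
def search_sequences_alt (sequences : List (List Int)) (search_numbers : List Int) : List (List Int × Int) :=
  let search_set := PySem.Set.ofList search_numbers
  let buckets : PySem.Dict Int (List (List Int × Int)) :=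
    sequences.foldl (fun buckets seq =>
      let c := PySem.Set.len (PySem.Set.inter search_set seq)
      if c > 0 then buckets.insert c (buckets.getD c [] ++ [(seq, c)]) else buckets)
      PySem.Dict.empty
  (PySem.List.pyRange (PySem.Set.len search_set) 0 (-1)).foldl
    (fun results c => results ++ buckets.getD c []) []

-- ===== PRECONDITION & SPEC =====
def Spec_search_sequences (sequences : List (List Int)) (search_numbers : List Int) (out : List (List Int × Int)) : Prop := out = search_sequences_alt sequences search_numbers
instance (sequences : List (List Int)) (search_numbers : List Int) (out : List (List Int × Int)) : Decidable (Spec_search_sequences sequences search_numbers out) := by unfold Spec_search_sequences; infer_instance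

-- ===== CLAIM (what is proved, stated in full; the proofs are below) =====
def Claim_equal_search_sequences : Prop := ∀ (sequences : List (List Int)) (search_numbers : List Int), Dom_search_sequences sequences search_numbers → Spec_search_sequences sequences search_numbers (search_sequences sequences search_numbers)

-- ===== LEMMAS AND PROOFS =====

-- descending bucket concatenation: filter(count = m) ++ filter(count = m-1) ++ … ++ filter(count = 1)
def descK (P : List (List Int × Int)) : Nat → List (List Int × Int)
  | 0 => []
  | m + 1 => P.filter (fun p => p.2 == ((m : Int) + 1)) ++ descK P m

theorem descK_nil (m : Nat) : descK [] m = [] := by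
  induction m with
  | zero => rfl
  | succ m ih => simp [descK, ih]

theorem mem_descK {P : List (List Int × Int)} {m : Nat} {z : List Int × Int}
    (hz : z ∈ descK P m) : 1 ≤ z.2 ∧ z.2 ≤ (m : Int) := by
  induction m with
  | zero => simp [descK] at hz
  | succ m ih =>
    simp only [descK, List.mem_append, List.mem_filter, beq_iff_eq] at hz
    rcases hz with ⟨_, h2⟩ | h
    · constructor <;> (rw [h2]; push_cast; omega)
    · have := ih h
      push_cast
      omega

theorem descK_append_high {P : List (List Int × Int)} {x : List Int × Int} {m : Nat}
    (hx : (m : Int) < x.2) : descK (P ++ [x]) m = descK P m := by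
  induction m with
  | zero => rfl
  | succ m ih =>
    have hx' : (m : Int) < x.2 := by push_cast at hx ⊢; omega
    simp only [descK, List.filter_append, ih hx']
    have hne : x.2 ≠ (m : Int) + 1 := by omega
    have hb : (x.2 == (m : Int) + 1) = false := beq_eq_false_iff_ne.mpr hne
    simp [List.filter, hb]

theorem insertBy_append_front {α : Type} (before : α → α → Bool) (x : α) (ys zs : List α)
    (h : ∀ y ∈ ys, before x y = false) :
    PySem.List.insertBy before x (ys ++ zs) = ys ++ PySem.List.insertBy before x zs := by
  induction ys with
  | nil => simp
  | cons y ys ih =>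
    have hy : before x y = false := h y (by simp)
    have hrest : ∀ y' ∈ ys, before x y' = false := fun y' h' => h y' (by simp [h'])
    rw [List.cons_append,
      show PySem.List.insertBy before x (y :: (ys ++ zs))
        = if before x y then x :: y :: (ys ++ zs) else y :: PySem.List.insertBy before x (ys ++ zs) from rfl,
      hy, if_neg (by simp), ih hrest, List.cons_append]

theorem insertBy_of_all_before {α : Type} (before : α → α → Bool) (x : α) (ys : List α)
    (h : ∀ y ∈ ys, before x y = true) :
    PySem.List.insertBy before x ys = x :: ys := by
  cases ys with
  | nil => rfl
  | cons y ys => simp [PySem.List.insertBy, h y (by simp)]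

-- inserting x into the descending bucket concatenation appends it to its own bucket
theorem insertBy_descK (P : List (List Int × Int)) (x : List Int × Int) (m : Nat)
    (h1 : 1 ≤ x.2) (h2 : x.2 ≤ (m : Int)) :
    PySem.List.insertBy (fun a b => decide (b.2 < a.2)) x (descK P m) = descK (P ++ [x]) m := by
  induction m with
  | zero => simp at h2; omega
  | succ m ih =>
    by_cases hx : x.2 = (m : Int) + 1
    · have hfront : ∀ y ∈ P.filter (fun p => p.2 == ((m : Int) + 1)), (fun a b => decide (b.2 < a.2)) x y = false := by
        intro y hy
        simp only [List.mem_filter, beq_iff_eq] at hy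
        simp [hy.2, hx]
      have hback : ∀ z ∈ descK P m, (fun a b => decide (b.2 < a.2)) x z = true := by
        intro z hz
        have := mem_descK hz
        simp only [decide_eq_true_eq]
        omega
      rw [descK, insertBy_append_front _ _ _ _ hfront, insertBy_of_all_before _ _ _ hback]
      rw [show descK (P ++ [x]) (m + 1) = (P ++ [x]).filter (fun p => p.2 == ((m : Int) + 1)) ++ descK (P ++ [x]) m from rfl]
      rw [descK_append_high (by omega), List.filter_append]
      have hb : (x.2 == (m : Int) + 1) = true := by simp [hx]
      simp [List.filter, hb]
    · have hx2 : x.2 ≤ (m : Int) := by push_cast at h2; omega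
      have hfront : ∀ y ∈ P.filter (fun p => p.2 == ((m : Int) + 1)), (fun a b => decide (b.2 < a.2)) x y = false := by
        intro y hy
        simp only [List.mem_filter, beq_iff_eq] at hy
        simp only [decide_eq_false_iff_not, not_lt]
        omega
      rw [descK, insertBy_append_front _ _ _ _ hfront, ih hx2]
      rw [show descK (P ++ [x]) (m + 1) = (P ++ [x]).filter (fun p => p.2 == ((m : Int) + 1)) ++ descK (P ++ [x]) m from rfl]
      rw [List.filter_append]
      have hb : (x.2 == (m : Int) + 1) = false := beq_eq_false_iff_ne.mpr hx
      simp [List.filter, hb]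

-- the stable reverse sort of a list with keys in [1, m] is the descending bucket concatenation
theorem sorted_rev_eq_descK (F : List (List Int × Int)) (m : Nat)
    (h : ∀ p ∈ F, 1 ≤ p.2 ∧ p.2 ≤ (m : Int)) :
    PySem.List.sorted F (fun x => x.2) true = descK F m := by
  rw [PySem.List.sorted_rev_eq_foldl_insertBy]
  suffices H : ∀ (L P : List (List Int × Int)), (∀ p ∈ L, 1 ≤ p.2 ∧ p.2 ≤ (m : Int)) →
      L.foldl (fun acc x => PySem.List.insertBy (fun a b => decide (b.2 < a.2)) x acc) (descK P m)
        = descK (P ++ L) m by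
    have := H F [] h
    simpa [descK_nil] using this
  intro L
  induction L with
  | nil => intro P _; simp
  | cons x L ih =>
    intro P hL
    have hx := hL x (by simp)
    simp only [List.foldl_cons]
    rw [insertBy_descK P x m hx.1 hx.2, ih (P ++ [x]) (fun p hp => hL p (by simp [hp]))]
    simp

-- the filtered pair list A builds (shared shape of both folds)
def foldA (search_set : PySem.Set Int) (sequences : List (List Int)) (acc : List (List Int × Int)) : List (List Int × Int) :=
  sequences.foldl (fun results seq =>
    let match_count := PySem.Set.len (PySem.Set.inter search_set seq)
    if match_count > 0 then results ++ [(seq, match_count)] else results) acc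

theorem foldA_mem (search_set : PySem.Set Int) (sequences : List (List Int))
    (acc : List (List Int × Int))
    (hacc : ∀ p ∈ acc, 1 ≤ p.2 ∧ p.2 ≤ (search_set.length : Int)) :
    ∀ p ∈ foldA search_set sequences acc, 1 ≤ p.2 ∧ p.2 ≤ (search_set.length : Int) := by
  induction sequences generalizing acc with
  | nil => simpa [foldA] using hacc
  | cons seq rest ih =>
    simp only [foldA, List.foldl_cons]
    split
    · next hpos =>
      apply ih
      intro p hp
      rcases List.mem_append.mp hp with h | h
      · exact hacc p h
      · simp only [List.mem_singleton] at h
        subst h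
        refine ⟨by exact_mod_cast hpos, ?_⟩
        simp only [PySem.Set.len, PySem.Set.inter]
        exact_mod_cast List.length_filter_le _ _
    · exact ih acc hacc

-- the dict of buckets B builds agrees bucket-by-bucket with filters of A's pair list
theorem foldB_getD (search_set : PySem.Set Int) (sequences : List (List Int))
    (d : PySem.Dict Int (List (List Int × Int))) (acc : List (List Int × Int))
    (hinv : ∀ c, d.getD c [] = acc.filter (fun p => p.2 == c)) :
    ∀ c, (sequences.foldl (fun buckets seq =>
        let c := PySem.Set.len (PySem.Set.inter search_set seq)
        if c > 0 then buckets.insert c (buckets.getD c [] ++ [(seq, c)]) else buckets) d).getD c []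
      = (foldA search_set sequences acc).filter (fun p => p.2 == c) := by
  induction sequences generalizing d acc with
  | nil => simpa [foldA] using hinv
  | cons seq rest ih =>
    simp only [List.foldl_cons, foldA]
    split
    · next hpos =>
      apply ih
      intro c
      rw [PySem.Dict.getD_insert, hinv, List.filter_append]
      by_cases hc : c = PySem.Set.len (PySem.Set.inter search_set seq)
      · simp [hc, List.filter]
      · rw [if_neg hc, hinv c]
        simp
        exact fun h => hc (Eq.symm h)
    · exact ih d acc hinv

-- range(m, 0, -1) walks the buckets from m down to 1
theorem pyRange_down (n : Nat) : PySem.List.pyRange (n : Int) 0 (-1)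
    = (List.range n).map (fun k : Nat => (n : Int) - (k : Int)) := by
  simp only [PySem.List.pyRange, if_neg (by norm_num : ¬(-1 : Int) = 0),
    if_neg (by norm_num : ¬(0 : Int) < -1)]
  cases n with
  | zero => simp
  | succ n =>
    rw [if_pos (by push_cast; omega : (0 : Int) < ((n + 1 : Nat) : Int))]
    have hcount : ((((n + 1 : Nat) : Int) - 0 + - -1 - 1) / - -1).toNat = n + 1 := by
      push_cast
      norm_num
    rw [hcount]
    apply List.map_congr_left
    intro k _
    push_cast
    ring

theorem flatMap_pyRange_descK (f : Int → List (List Int × Int)) (m : Nat)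
    (F : List (List Int × Int)) (hf : ∀ c, f c = F.filter (fun p => p.2 == c)) :
    (PySem.List.pyRange (m : Int) 0 (-1)).flatMap f = descK F m := by
  induction m with
  | zero => rw [pyRange_down]; simp [descK]
  | succ m ih =>
    rw [pyRange_down, List.range_succ_eq_map, List.map_cons, List.flatMap_cons]
    rw [show descK F (m + 1) = F.filter (fun p => p.2 == ((m : Int) + 1)) ++ descK F m from rfl]
    congr 1
    · have harg : ((m + 1 : Nat) : Int) - ((0 : Nat) : Int) = (m : Int) + 1 := by push_cast; ring
      rw [harg, hf]
    · rw [List.map_map]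
      have hfun : ((fun k : Nat => ((m + 1 : Nat) : Int) - (k : Int)) ∘ Nat.succ)
          = fun k : Nat => (m : Int) - (k : Int) := by
        funext k
        simp only [Function.comp]
        push_cast
        ring
      rw [hfun, ← pyRange_down m, ih]

-- ===== VERDICT (by name: the statement is the Claim_ definition above) =====
theorem search_sequences_spec : Claim_equal_search_sequences := by
  intro sequences search_numbers _
  show PySem.List.sorted
      (List.foldl (fun results seq =>
          let match_count := PySem.Set.len (PySem.Set.inter (PySem.Set.ofList search_numbers) seq)
          if match_count > 0 then results ++ [(seq, match_count)] else results) [] sequences)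
      (fun x => x.2) true
    = List.foldl (fun results c => results ++ (List.foldl (fun buckets seq =>
          let c := PySem.Set.len (PySem.Set.inter (PySem.Set.ofList search_numbers) seq)
          if c > 0 then buckets.insert c (buckets.getD c [] ++ [(seq, c)]) else buckets)
          PySem.Dict.empty sequences).getD c []) []
        (PySem.List.pyRange (PySem.Set.len (PySem.Set.ofList search_numbers)) 0 (-1))
  have hmem : ∀ p ∈ foldA (PySem.Set.ofList search_numbers) sequences [],
      1 ≤ p.2 ∧ p.2 ≤ ((PySem.Set.ofList search_numbers).length : Int) :=
    foldA_mem _ sequences [] (by simp)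
  have hd := foldB_getD (PySem.Set.ofList search_numbers) sequences PySem.Dict.empty []
    (fun c => rfl)
  rw [PySem.List.foldl_append_eq_flatMap, List.nil_append,
    show PySem.Set.len (PySem.Set.ofList search_numbers)
      = ((PySem.Set.ofList search_numbers).length : Int) from rfl,
    flatMap_pyRange_descK _ (PySem.Set.ofList search_numbers).length
      (foldA (PySem.Set.ofList search_numbers) sequences []) hd]
  exact sorted_rev_eq_descK _ _ hmem
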